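-- pv_equiv track=rewrite | github.com/patatorre/deco_jukebox | jukebox.py | split_string_no_truncate_word
-- ===== SOURCE A (Python) =====
-- def split_string_no_truncate_word(this_string, line_maxlength) :
--     split_string = this_string.split(' ')
--     short_string = ""
--     short_len = 0
--     split_index = 0
--     n_splits = len(split_string)
--     while (short_len < line_maxlength) and (split_index < n_splits):
--         short_string = short_string + split_string[split_index] + ' '
--         short_len = short_len + len(split_string[split_index]) + 1
--         split_index = split_index + 1
--     leftover = ""
--     short_len = 0
--     while (short_len < line_maxlength) and (split_index < n_splits):
--         leftover = leftover + split_string[split_index] + ' '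
--         short_len = short_len + len(split_string[split_index]) + 1
--         split_index = split_index + 1
--
--     return(short_string, leftover)
-- ===== SOURCE B (Python) =====
-- def split_string_no_truncate_word(this_string, line_maxlength):
--     words = this_string.split(' ')
--     n = len(words)
--     prefix = [0]
--     for w in words:
--         prefix.append(prefix[-1] + len(w) + 1)
--     k1 = next((k for k in range(n) if prefix[k] >= line_maxlength), n)
--     k2 = next((k for k in range(k1, n) if prefix[k] - prefix[k1] >= line_maxlength), n)
--     first = ' '.join(words[:k1]) + ' ' if k1 > 0 else ''
--     second = ' '.join(words[k1:k2]) + ' ' if k2 > k1 else ''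
--     return (first, second)
-- ===== Notes on version B (the rewrite author's own statement) =====
-- stated objective: alternative
-- what changed: Replaces A's two mutate-and-append while loops by computing the prefix sums of word costs (len(w)+1), finding the two chunk boundary indices k1 and k2 by a first-index search over those sums, and building each chunk with slice-and-join.
import Mathlib
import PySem

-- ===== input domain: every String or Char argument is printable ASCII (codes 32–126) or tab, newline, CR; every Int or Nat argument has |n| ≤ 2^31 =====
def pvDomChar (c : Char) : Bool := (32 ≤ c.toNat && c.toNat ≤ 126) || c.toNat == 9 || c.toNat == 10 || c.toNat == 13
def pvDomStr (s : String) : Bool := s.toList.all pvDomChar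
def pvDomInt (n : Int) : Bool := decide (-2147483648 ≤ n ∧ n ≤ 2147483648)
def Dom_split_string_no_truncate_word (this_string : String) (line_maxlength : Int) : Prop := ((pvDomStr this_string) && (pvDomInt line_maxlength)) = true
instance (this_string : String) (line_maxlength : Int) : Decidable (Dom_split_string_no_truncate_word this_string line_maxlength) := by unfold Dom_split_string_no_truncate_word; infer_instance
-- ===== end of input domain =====

-- B replaces A's two mutate-and-scan while loops by prefix sums plus boundary-index search
-- and slice-and-join; objective: alternative (same linear cost, different decomposition).

-- ===== PORT A =====
-- the two identical while loops of A: state (acc, short_len, split_index)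
def pvLoopA (ws : List (List Char)) (n : Nat) (lm : Int) (acc : List Char) (slen : Int) (i : Nat) : List Char × Nat :=
  if slen < lm ∧ i < n then
    let w := ws.getD i []
    pvLoopA ws n lm (acc ++ w ++ [' ']) (slen + (w.length : Int) + 1) (i + 1)
  else (acc, i)
termination_by n - i
decreasing_by omega

def split_string_no_truncate_word (this_string : String) (line_maxlength : Int) : String × String :=
  let ws := PySem.Chars.splitOn this_string.toList [' ']
  let n := ws.length
  let p := pvLoopA ws n line_maxlength [] 0 0
  let q := pvLoopA ws n line_maxlength [] 0 p.2
  (String.ofList p.1, String.ofList q.1)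

-- ===== PORT B =====
-- prefix[0]=0; prefix.append(prefix[-1] + len(w) + 1) for each word
def pvPrefixB (ws : List (List Char)) : List Int :=
  ws.foldl (fun p w => p ++ [PySem.List.pyGetD p (-1) 0 + (w.length : Int) + 1]) [0]

def split_string_no_truncate_word_alt (this_string : String) (line_maxlength : Int) : String × String :=
  let ws := PySem.Chars.splitOn this_string.toList [' ']
  let n := ws.length
  let pref := pvPrefixB ws
  let k1 := ((List.range n).find? (fun k => decide (line_maxlength ≤ pref.getD k 0))).getD n
  let k2 := ((List.range' k1 (n - k1)).find?
              (fun k => decide (line_maxlength ≤ pref.getD k 0 - pref.getD k1 0))).getD n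
  let first := if 0 < k1 then String.ofList (PySem.Chars.join [' '] (ws.take k1) ++ [' ']) else ""
  let second := if k1 < k2 then
      String.ofList (PySem.Chars.join [' '] ((ws.drop k1).take (k2 - k1)) ++ [' ']) else ""
  (first, second)

-- ===== PRECONDITION & SPEC =====
def Spec_split_string_no_truncate_word (this_string : String) (line_maxlength : Int) (out : String × String) : Prop := out = split_string_no_truncate_word_alt this_string line_maxlength
instance (this_string : String) (line_maxlength : Int) (out : String × String) : Decidable (Spec_split_string_no_truncate_word this_string line_maxlength out) := by unfold Spec_split_string_no_truncate_word; infer_instance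

-- ===== CLAIM (what is proved, stated in full; the proofs are below) =====
def Claim_equal_split_string_no_truncate_word : Prop := ∀ (this_string : String) (line_maxlength : Int), Dom_split_string_no_truncate_word this_string line_maxlength → Spec_split_string_no_truncate_word this_string line_maxlength (split_string_no_truncate_word this_string line_maxlength)

-- ===== LEMMAS AND PROOFS =====

-- prefix-sum of word costs: pvS ws k = Σ_{j<k} (len ws[j] + 1)
def pvS : List (List Char) → Nat → Int
  | _, 0 => 0
  | [], _ + 1 => 0
  | w :: t, k + 1 => ((w.length : Int) + 1) + pvS t k

-- the word chunk "w0 + ' ' + w1 + ' ' + …" A's loop builds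
def pvGlue (L : List (List Char)) : List Char := (L.map (fun w => w ++ [' '])).flatten

-- partial sums list produced by B's prefix loop after the seed 0
def pvPS : List (List Char) → Int → List Int
  | [], _ => []
  | w :: t, c => (c + (w.length : Int) + 1) :: pvPS t (c + (w.length : Int) + 1)

-- the stopping index of A's loop started at (i, slen)
def pvK (ws : List (List Char)) (lm : Int) (i : Nat) (slen : Int) : Nat :=
  ((List.range' i (ws.length - i)).find?
    (fun k => decide (lm ≤ slen + pvS ws k - pvS ws i))).getD ws.length

theorem pvFind?_congr {α : Type} (l : List α) (p q : α → Bool)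
    (h : ∀ x ∈ l, p x = q x) : l.find? p = l.find? q := by
  induction l with
  | nil => rfl
  | cons a t ih =>
    simp only [List.find?_cons, h a (by simp)]
    cases q a
    · exact ih (fun x hx => h x (by simp [hx]))
    · rfl

theorem pvS_succ (ws : List (List Char)) (k : Nat) (hk : k < ws.length) :
    pvS ws (k + 1) = pvS ws k + ((ws.getD k []).length : Int) + 1 := by
  induction ws generalizing k with
  | nil => simp at hk
  | cons w t ih =>
    cases k with
    | zero => simp [pvS]; try ring
    | succ k =>
      simp only [pvS, List.getD_cons_succ]
      rw [ih k (by simpa using hk)]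
      ring

theorem pvFoldl_pref (l : List (List Char)) :
    ∀ (xs : List Int) (c : Int),
    l.foldl (fun p w => p ++ [PySem.List.pyGetD p (-1) 0 + (w.length : Int) + 1]) (xs ++ [c])
      = (xs ++ [c]) ++ pvPS l c := by
  induction l with
  | nil => simp [pvPS]
  | cons w t ih =>
    intro xs c
    simp only [List.foldl_cons, PySem.List.pyGetD_neg_one_append_singleton, pvPS]
    rw [show xs ++ [c] ++ [c + (w.length : Int) + 1]
          = (xs ++ [c]) ++ [c + (w.length : Int) + 1] from rfl,
        ih (xs ++ [c]) (c + (w.length : Int) + 1)]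
    simp

theorem pvPrefixB_eq (ws : List (List Char)) : pvPrefixB ws = 0 :: pvPS ws 0 := by
  have h := pvFoldl_pref ws [] 0
  simpa [pvPrefixB] using h

theorem pvPS_getD (ws : List (List Char)) :
    ∀ (c : Int) (k : Nat), k < ws.length → (pvPS ws c).getD k 0 = c + pvS ws (k + 1) := by
  induction ws with
  | nil => intro c k hk; simp at hk
  | cons w t ih =>
    intro c k hk
    cases k with
    | zero => simp [pvPS, pvS]; ring
    | succ k =>
      simp only [pvPS, List.getD_cons_succ]
      rw [ih _ k (by simpa using hk)]
      simp only [pvS]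
      ring

theorem pvPrefD (ws : List (List Char)) (k : Nat) (hk : k ≤ ws.length) :
    (pvPrefixB ws).getD k 0 = pvS ws k := by
  rw [pvPrefixB_eq]
  cases k with
  | zero => simp [pvS]
  | succ k =>
    simp only [List.getD_cons_succ]
    rw [pvPS_getD ws 0 k (by omega)]
    ring

theorem pvK_ge (ws : List (List Char)) (lm : Int) (i : Nat) (slen : Int) (hi : i ≤ ws.length) :
    i ≤ pvK ws lm i slen := by
  unfold pvK
  cases h : (List.range' i (ws.length - i)).find?
      (fun k => decide (lm ≤ slen + pvS ws k - pvS ws i)) with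
  | none => simpa using hi
  | some k =>
    have := List.mem_range'_1.mp (List.mem_of_find?_eq_some h)
    simpa using this.1

theorem pvK_le (ws : List (List Char)) (lm : Int) (i : Nat) (slen : Int) :
    pvK ws lm i slen ≤ ws.length := by
  unfold pvK
  cases h : (List.range' i (ws.length - i)).find?
      (fun k => decide (lm ≤ slen + pvS ws k - pvS ws i)) with
  | none => simp
  | some k =>
    have := List.mem_range'_1.mp (List.mem_of_find?_eq_some h)
    simp only [Option.getD_some]
    omega

theorem pvLoopA_eq (ws : List (List Char)) (lm : Int) :
    ∀ (fuel i : Nat) (slen : Int) (acc : List Char),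
    ws.length - i ≤ fuel → i ≤ ws.length →
    pvLoopA ws ws.length lm acc slen i
      = (acc ++ pvGlue ((ws.drop i).take (pvK ws lm i slen - i)), pvK ws lm i slen) := by
  intro fuel
  induction fuel with
  | zero =>
    intro i slen acc hf hi
    have hin : i = ws.length := by omega
    rw [pvLoopA, if_neg (by omega)]
    have hK : pvK ws lm i slen = i := by
      unfold pvK; subst hin; simp
    rw [hK]
    simp [pvGlue]
  | succ fuel ih =>
    intro i slen acc hf hi
    by_cases hc : slen < lm ∧ i < ws.length
    · rw [pvLoopA, if_pos hc]
      have hiw : i < ws.length := hc.2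
      set w := ws.getD i [] with hw
      have hS : pvS ws (i + 1) = pvS ws i + (w.length : Int) + 1 := pvS_succ ws i hiw
      have hKeq : pvK ws lm (i + 1) (slen + (w.length : Int) + 1) = pvK ws lm i slen := by
        unfold pvK
        have hr : List.range' i (ws.length - i)
            = i :: List.range' (i + 1) (ws.length - (i + 1)) := by
          have : ws.length - i = (ws.length - (i + 1)) + 1 := by omega
          rw [this, List.range'_succ]
        rw [hr, List.find?_cons]
        have hfalse : (decide (lm ≤ slen + pvS ws i - pvS ws i)) = false := by
          simp; omega
        rw [hfalse]
        rw [pvFind?_congr _ _ (fun k => decide (lm ≤ slen + pvS ws k - pvS ws i))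
            (by intro x hx; simp only [decide_eq_decide]; omega)]
      rw [ih (i + 1) (slen + (w.length : Int) + 1) (acc ++ w ++ [' ']) (by omega) (by omega), hKeq]
      have hKge : i + 1 ≤ pvK ws lm i slen := by
        rw [← hKeq]; exact pvK_ge ws lm (i + 1) _ (by omega)
      have hdrop : ws.drop i = w :: ws.drop (i + 1) := by
        rw [List.drop_eq_getElem_cons hiw, hw, List.getD_eq_getElem ws [] hiw]
      have htake : (ws.drop i).take (pvK ws lm i slen - i)
          = w :: (ws.drop (i + 1)).take (pvK ws lm i slen - (i + 1)) := by
        rw [hdrop]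
        have : pvK ws lm i slen - i = (pvK ws lm i slen - (i + 1)) + 1 := by omega
        rw [this, List.take_succ_cons]
      rw [htake]
      simp [pvGlue]
    · rw [pvLoopA, if_neg hc]
      have hK : pvK ws lm i slen = i := by
        unfold pvK
        rcases Nat.lt_or_ge i ws.length with hlt | hge
        · have hr : List.range' i (ws.length - i)
              = i :: List.range' (i + 1) (ws.length - (i + 1)) := by
            have : ws.length - i = (ws.length - (i + 1)) + 1 := by omega
            rw [this, List.range'_succ]
          have hslen : lm ≤ slen := by
            by_contra h'; exact hc ⟨by omega, hlt⟩
          rw [hr, List.find?_cons]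
          have : (decide (lm ≤ slen + pvS ws i - pvS ws i)) = true := by
            simp; omega
          rw [this]
          simp
        · have hin : i = ws.length := by omega
          subst hin; simp
      rw [hK]
      simp [pvGlue]

theorem pvGlue_eq_join (L : List (List Char)) (h : L ≠ []) :
    pvGlue L = PySem.Chars.join [' '] L ++ [' '] := by
  induction L with
  | nil => exact absurd rfl h
  | cons w t ih =>
    cases t with
    | nil => simp [pvGlue, PySem.Chars.join_singleton]
    | cons x t' =>
      rw [PySem.Chars.join_cons_cons]
      have : pvGlue (w :: x :: t') = (w ++ [' ']) ++ pvGlue (x :: t') := by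
        simp [pvGlue]
      rw [this, ih (by simp)]
      simp

-- ===== VERDICT (by name: the statement is the Claim_ definition above) =====
theorem split_string_no_truncate_word_spec : Claim_equal_split_string_no_truncate_word := by
  intro s lm _
  unfold Spec_split_string_no_truncate_word
  simp only [split_string_no_truncate_word, split_string_no_truncate_word_alt]
  set ws := PySem.Chars.splitOn s.toList [' '] with hws
  set n := ws.length with hn
  -- B's k1 equals A's first stopping index
  have hk1 : ((List.range n).find? (fun k => decide (lm ≤ (pvPrefixB ws).getD k 0))).getD n
      = pvK ws lm 0 0 := by
    unfold pvK
    rw [List.range_eq_range']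
    rw [pvFind?_congr _ _ (fun k => decide (lm ≤ 0 + pvS ws k - pvS ws 0))
        (by
          intro x hx
          have hxn : x < n := by simpa [List.mem_range'_1] using hx
          rw [pvPrefD ws x (by omega)]
          simp only [decide_eq_decide, pvS]
          omega)]
    simp [hn]
  set k1 := pvK ws lm 0 0 with hk1d
  have hk1le : k1 ≤ n := pvK_le ws lm 0 0
  -- B's k2 equals A's second stopping index (started at k1)
  have hk2 : ((List.range' k1 (n - k1)).find?
        (fun k => decide (lm ≤ (pvPrefixB ws).getD k 0 - (pvPrefixB ws).getD k1 0))).getD n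
      = pvK ws lm k1 0 := by
    unfold pvK
    rw [pvFind?_congr _ _ (fun k => decide (lm ≤ 0 + pvS ws k - pvS ws k1))
        (by
          intro x hx
          have hxn : x < n := by
            have := List.mem_range'_1.mp hx; omega
          rw [pvPrefD ws x (by omega), pvPrefD ws k1 hk1le]
          simp only [decide_eq_decide]
          omega)]
  set k2 := pvK ws lm k1 0 with hk2d
  have hk2ge : k1 ≤ k2 := pvK_ge ws lm k1 0 hk1le
  have hk2le : k2 ≤ n := pvK_le ws lm k1 0
  have hp := pvLoopA_eq ws lm n 0 0 [] (by omega) (by omega)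
  have hq := pvLoopA_eq ws lm n k1 0 [] (by omega) hk1le
  simp only [← hn] at hp hq
  rw [hk1, hk2, hp]
  simp only
  rw [hq]
  rw [← hk1d, ← hk2d]
  simp only [List.nil_append, List.drop_zero, Nat.sub_zero]
  congr 1
  · -- first component
    by_cases h1 : 0 < k1
    · rw [if_pos h1]
      have hne : ws.take k1 ≠ [] := by
        rw [Ne, List.take_eq_nil_iff]
        rintro (h' | h')
        · omega
        · have hlen : ws.length = 0 := by rw [h']; rfl
          omega
      rw [pvGlue_eq_join _ hne]
    · rw [if_neg h1]
      have h0 : k1 = 0 := by omega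
      rw [h0]
      simp [pvGlue]
  · -- second component
    by_cases h2 : k1 < k2
    · rw [if_pos h2]
      have hne : (ws.drop k1).take (k2 - k1) ≠ [] := by
        rw [Ne, List.take_eq_nil_iff, List.drop_eq_nil_iff]
        rintro (h' | h') <;> omega
      rw [pvGlue_eq_join _ hne]
    · rw [if_neg h2]
      have h0 : k2 = k1 := by omega
      rw [h0]
      simp [pvGlue]
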